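-- pv_equiv track=rewrite | github.com/alkemann/advent2015-py3 | advent/five/five.py | is_nice_improved
-- ===== SOURCE A (Python) =====
-- def is_nice_improved(s=""):
--     has_the_gapped_combo = False
--     has_the_double_string = False
--     for i in range(0, len(s)):
--         if s[i:i+2] in s[i+2:]:
--             has_the_double_string = True
--         if i >= 2 and s[i] == s[i-2]:
--             has_the_gapped_combo = True
--
--     return has_the_gapped_combo and has_the_double_string
-- ===== SOURCE B (Python) =====
-- def is_nice_improved(s=""):
--     gapped = any(s[i] == s[i + 2] for i in range(len(s) - 2))
--     first = {}
--     pair_twice = False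
--     for i in range(len(s) - 1):
--         p = s[i:i + 2]
--         if p in first:
--             if i - first[p] >= 2:
--                 pair_twice = True
--         else:
--             first[p] = i
--     return gapped and pair_twice
-- ===== Notes on version B (the rewrite author's own statement) =====
-- stated objective: faster
-- what changed: Replaces the per-index search of each two-character window in the remaining suffix with a single pass that records each pair's first occurrence in a dict and checks the index gap, and computes the gapped-letter test with a direct comprehension over indices.
import Mathlib
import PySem

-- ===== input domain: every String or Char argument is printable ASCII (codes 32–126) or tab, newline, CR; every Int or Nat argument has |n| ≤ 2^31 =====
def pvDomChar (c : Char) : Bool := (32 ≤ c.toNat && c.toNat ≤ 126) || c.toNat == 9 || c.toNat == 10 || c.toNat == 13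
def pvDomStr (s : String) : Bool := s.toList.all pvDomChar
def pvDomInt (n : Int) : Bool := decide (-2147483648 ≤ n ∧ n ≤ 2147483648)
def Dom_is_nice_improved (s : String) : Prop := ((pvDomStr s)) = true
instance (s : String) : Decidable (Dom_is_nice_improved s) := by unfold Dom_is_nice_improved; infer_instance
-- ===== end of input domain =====

-- B replaces A's per-index substring search with a single pass recording each pair's first
-- occurrence in a dict; the two return values are proved equal on all strings.

-- ===== PORT A =====
-- body of A's 'for i in range(0, len(s))' loop; state = (has_the_gapped_combo, has_the_double_string)
def astep (l : List Char) (st : Bool × Bool) (i : Int) : Bool × Bool :=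
  let hd := if PySem.Chars.isIn (PySem.List.slice l (some i) (some (i + 2)))
                (PySem.List.slice l (some (i + 2)) none) then true else st.2
  let hg := if 2 ≤ i ∧ PySem.List.pyGetD l i ' ' = PySem.List.pyGetD l (i - 2) ' '
            then true else st.1
  (hg, hd)

def is_nice_improved (s : String) : Bool :=
  let l := s.toList
  let st := (PySem.List.pyRange 0 (l.length : Int) 1).foldl (astep l) (false, false)
  st.1 && st.2

-- ===== PORT B =====
-- body of B's 'for i in range(len(s) - 1)' loop; state = (first, pair_twice)
def bstep (l : List Char) (st : PySem.Dict (List Char) Int × Bool) (i : Int) :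
    PySem.Dict (List Char) Int × Bool :=
  let p := PySem.List.slice l (some i) (some (i + 2))
  match st.1.get? p with
  | some j => (st.1, if 2 ≤ i - j then true else st.2)
  | none => (st.1.insert p i, st.2)

def is_nice_improved_alt (s : String) : Bool :=
  let l := s.toList
  let gapped := (PySem.List.pyRange 0 ((l.length : Int) - 2) 1).any
    (fun i => PySem.List.pyGetD l i ' ' == PySem.List.pyGetD l (i + 2) ' ')
  let r := (PySem.List.pyRange 0 ((l.length : Int) - 1) 1).foldl (bstep l)
    (PySem.Dict.empty, false)
  gapped && r.2

-- ===== PRECONDITION & SPEC =====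
def Spec_is_nice_improved (s : String) (out : Bool) : Prop := out = is_nice_improved_alt s
instance (s : String) (out : Bool) : Decidable (Spec_is_nice_improved s out) := by unfold Spec_is_nice_improved; infer_instance

-- ===== CLAIM (what is proved, stated in full; the proofs are below) =====
def Claim_equal_is_nice_improved : Prop := ∀ (s : String), Dom_is_nice_improved s → Spec_is_nice_improved s (is_nice_improved s)

-- ===== LEMMAS AND PROOFS =====

-- the two-character window s[i:i+2] as a list function on Nat indices
def pairAt (l : List Char) (m : Nat) : List Char := (l.drop m).take 2

-- the two existential characterisations both programs are reduced to
def GapP (l : List Char) : Prop :=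
  ∃ m : Nat, m + 2 < l.length ∧ l.getD (m + 2) ' ' = l.getD m ' '

def PairP (l : List Char) : Prop :=
  ∃ i j : Nat, i + 2 ≤ j ∧ j + 2 ≤ l.length ∧ pairAt l j = pairAt l i

lemma slice_pairAt (l : List Char) (m : Nat) :
    PySem.List.slice l (some (m : Int)) (some ((m : Int) + 2)) = pairAt l m := by
  have h : ((m : Int) + 2) = ((m + 2 : Nat) : Int) := by push_cast; ring
  rw [h, PySem.List.slice_natCast]
  simp [pairAt]

lemma length_pairAt (l : List Char) (m : Nat) :
    (pairAt l m).length = min 2 (l.length - m) := by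
  simp [pairAt]

lemma prefix_pairAt_iff {l : List Char} {m j : Nat} (hm : m + 2 ≤ l.length) :
    pairAt l m <+: l.drop j ↔ (j + 2 ≤ l.length ∧ pairAt l j = pairAt l m) := by
  have hlen : (pairAt l m).length = 2 := by rw [length_pairAt]; omega
  constructor
  · intro h
    have he : pairAt l m = (l.drop j).take 2 := by
      have := List.prefix_iff_eq_take.mp h
      rwa [hlen] at this
    have hj : j + 2 ≤ l.length := by
      have h2 : (pairAt l j).length = 2 := by
        simp only [pairAt]; rw [← he]; exact hlen
      rw [length_pairAt] at h2; omega
    exact ⟨hj, he.symm⟩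
  · rintro ⟨_, he⟩
    rw [← he]
    exact List.take_prefix 2 (l.drop j)

lemma and_congr_bool {a b c d : Bool} (h1 : a = true ↔ c = true) (h2 : b = true ↔ d = true) :
    (a && b) = (c && d) := by
  cases a <;> cases b <;> cases c <;> cases d <;> simp_all

-- ---- A's loop, characterised ----

lemma a_loop (l : List Char) (k : Nat) :
    (((PySem.List.pyRange 0 (k : Int) 1).foldl (astep l) (false, false)).1 = true
       ↔ ∃ m : Nat, m < k ∧ 2 ≤ (m : Int) ∧
           PySem.List.pyGetD l (m : Int) ' ' = PySem.List.pyGetD l ((m : Int) - 2) ' ')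
    ∧ (((PySem.List.pyRange 0 (k : Int) 1).foldl (astep l) (false, false)).2 = true
       ↔ ∃ m : Nat, m < k ∧ PySem.Chars.isIn
           (PySem.List.slice l (some (m : Int)) (some ((m : Int) + 2)))
           (PySem.List.slice l (some ((m : Int) + 2)) none) = true) := by
  induction k with
  | zero =>
    rw [PySem.List.pyRange_one_eq_nil (by omega)]
    simp
  | succ k ih =>
    have hr : PySem.List.pyRange 0 ((k + 1 : Nat) : Int) 1
        = PySem.List.pyRange 0 (k : Int) 1 ++ [(k : Int)] := by
      push_cast
      exact PySem.List.pyRange_one_succ_right (by omega)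
    rw [hr, List.foldl_append, List.foldl_cons, List.foldl_nil]
    obtain ⟨ih1, ih2⟩ := ih
    constructor
    · show (if 2 ≤ (k : Int) ∧ _ then true else _) = true ↔ _
      split_ifs with hc
      · simp only [true_iff]
        exact ⟨k, by omega, hc.1, hc.2⟩
      · rw [ih1]
        constructor
        · rintro ⟨m, hm, h2⟩; exact ⟨m, by omega, h2⟩
        · rintro ⟨m, hm, h2⟩
          refine ⟨m, ?_, h2⟩
          rcases Nat.lt_succ_iff_lt_or_eq.mp hm with h | h
          · exact h
          · subst h; exact absurd h2 hc
    · show (if PySem.Chars.isIn _ _ = true then true else _) = true ↔ _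
      split_ifs with hc
      · simp only [true_iff]
        exact ⟨k, by omega, hc⟩
      · rw [ih2]
        constructor
        · rintro ⟨m, hm, h2⟩; exact ⟨m, by omega, h2⟩
        · rintro ⟨m, hm, h2⟩
          refine ⟨m, ?_, h2⟩
          rcases Nat.lt_succ_iff_lt_or_eq.mp hm with h | h
          · exact h
          · subst h; exact absurd h2 hc

lemma agap_iff (l : List Char) :
    (∃ m : Nat, m < l.length ∧ 2 ≤ (m : Int) ∧
        PySem.List.pyGetD l (m : Int) ' ' = PySem.List.pyGetD l ((m : Int) - 2) ' ')
      ↔ GapP l := by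
  constructor
  · rintro ⟨m, hm, h2, he⟩
    have h2' : 2 ≤ m := by exact_mod_cast h2
    refine ⟨m - 2, by omega, ?_⟩
    have e1 : ((m : Int) - 2) = ((m - 2 : Nat) : Int) := by omega
    have e2 : m - 2 + 2 = m := by omega
    rw [e1, PySem.List.pyGetD_natCast, PySem.List.pyGetD_natCast] at he
    rw [e2]
    exact he
  · rintro ⟨m, hm, he⟩
    refine ⟨m + 2, by omega, by push_cast; omega, ?_⟩
    have e1 : (((m + 2 : Nat) : Int) - 2) = ((m : Nat) : Int) := by push_cast; ring
    rw [e1, PySem.List.pyGetD_natCast, PySem.List.pyGetD_natCast]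
    exact he

lemma apair_iff (l : List Char) :
    (∃ m : Nat, m < l.length ∧ PySem.Chars.isIn
        (PySem.List.slice l (some (m : Int)) (some ((m : Int) + 2)))
        (PySem.List.slice l (some ((m : Int) + 2)) none) = true)
      ↔ PairP l := by
  have eslice : ∀ m : Nat, PySem.List.slice l (some ((m : Int) + 2)) none = l.drop (m + 2) := by
    intro m
    have h : ((m : Int) + 2) = ((m + 2 : Nat) : Int) := by push_cast; ring
    rw [h, PySem.List.slice_from_natCast]
  constructor
  · rintro ⟨m, hm, hin⟩
    rw [slice_pairAt, eslice] at hin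
    obtain ⟨t, hpre⟩ := (PySem.Chars.exists_prefix_drop_iff_isIn _ _).mpr hin
    rw [List.drop_drop] at hpre
    by_cases hm2 : m + 2 ≤ l.length
    · obtain ⟨hj, he⟩ := (prefix_pairAt_iff hm2).mp hpre
      exact ⟨m, m + 2 + t, by omega, hj, he⟩
    · exfalso
      have hnil : l.drop (m + 2 + t) = [] := List.drop_eq_nil_of_le (by omega)
      rw [hnil] at hpre
      have := List.prefix_nil.mp hpre
      have hlp := length_pairAt l m
      rw [this] at hlp
      simp at hlp
      omega
  · rintro ⟨i, j, hij, hj, he⟩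
    refine ⟨i, by omega, ?_⟩
    rw [slice_pairAt, eslice]
    refine (PySem.Chars.exists_prefix_drop_iff_isIn _ _).mp ⟨j - (i + 2), ?_⟩
    rw [List.drop_drop]
    have e : i + 2 + (j - (i + 2)) = j := by omega
    rw [e]
    exact (prefix_pairAt_iff (by omega)).mpr ⟨hj, he⟩

-- ---- B's gapped test ----

lemma bgap_iff (l : List Char) :
    ((PySem.List.pyRange 0 ((l.length : Int) - 2) 1).any
        (fun i => PySem.List.pyGetD l i ' ' == PySem.List.pyGetD l (i + 2) ' ') = true)
      ↔ GapP l := by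
  rw [List.any_eq_true]
  constructor
  · rintro ⟨i, hi, hp⟩
    rw [PySem.List.mem_pyRange_one] at hi
    obtain ⟨h0, h2⟩ := hi
    obtain ⟨m, rfl⟩ := Int.eq_ofNat_of_zero_le h0
    have e : ((m : Int) + 2) = ((m + 2 : Nat) : Int) := by push_cast; ring
    rw [e, PySem.List.pyGetD_natCast, PySem.List.pyGetD_natCast, beq_iff_eq] at hp
    exact ⟨m, by omega, hp.symm⟩
  · rintro ⟨m, hm, he⟩
    refine ⟨(m : Int), ?_, ?_⟩
    · rw [PySem.List.mem_pyRange_one]; omega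
    · have e : ((m : Int) + 2) = ((m + 2 : Nat) : Int) := by push_cast; ring
      rw [e, PySem.List.pyGetD_natCast, PySem.List.pyGetD_natCast, beq_iff_eq]
      exact he.symm

-- ---- B's dict loop ----

lemma find?_range_minimal {P : Nat → Bool} :
    ∀ {k f : Nat}, (List.range k).find? P = some f →
      f < k ∧ P f = true ∧ ∀ i, i < f → P i = false := by
  intro k
  induction k with
  | zero => intro f h; simp at h
  | succ k ih =>
    intro f h
    rw [List.range_succ, List.find?_append] at h
    cases hc : (List.range k).find? P with
    | some g =>
      rw [hc, Option.some_or] at h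
      obtain rfl : g = f := by injection h
      obtain ⟨h1, h2, h3⟩ := ih hc
      exact ⟨by omega, h2, h3⟩
    | none =>
      rw [hc, Option.none_or] at h
      have hnone := List.find?_eq_none.mp hc
      by_cases hPk : P k = true
      · have hf : f = k := by
          simp only [List.find?_cons, hPk] at h
          injection h
          omega
        subst hf
        refine ⟨by omega, hPk, ?_⟩
        intro i hi
        have := hnone i (List.mem_range.mpr hi)
        simpa using this
      · exfalso
        simp only [List.find?_cons] at h
        rw [Bool.not_eq_true] at hPk
        rw [hPk] at h
        simp at h

lemma b_loop_inv (l : List Char) (k : Nat) :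
    (∀ q : List Char,
      ((PySem.List.pyRange 0 (k : Int) 1).foldl (bstep l) (PySem.Dict.empty, false)).1.get? q
        = ((List.range k).find? (fun i => pairAt l i == q)).map (fun i => (i : Int)))
    ∧ (((PySem.List.pyRange 0 (k : Int) 1).foldl (bstep l) (PySem.Dict.empty, false)).2 = true
        ↔ ∃ i j : Nat, i + 2 ≤ j ∧ j < k ∧ pairAt l j = pairAt l i) := by
  induction k with
  | zero =>
    rw [PySem.List.pyRange_one_eq_nil (by omega)]
    simp only [List.foldl_nil]
    refine ⟨?_, ?_⟩
    · intro q; simp [PySem.Dict.get?_empty]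
    · constructor
      · intro h; simp at h
      · rintro ⟨i, j, _, hj, _⟩; omega
  | succ k ih =>
    obtain ⟨ihd, ihb⟩ := ih
    have hr : PySem.List.pyRange 0 ((k + 1 : Nat) : Int) 1
        = PySem.List.pyRange 0 (k : Int) 1 ++ [(k : Int)] := by
      push_cast
      exact PySem.List.pyRange_one_succ_right (by omega)
    rw [hr, List.foldl_append, List.foldl_cons, List.foldl_nil]
    set r := (PySem.List.pyRange 0 (k : Int) 1).foldl (bstep l) (PySem.Dict.empty, false) with hrdef
    have hp := slice_pairAt l k
    cases hfind : (List.range k).find? (fun i => pairAt l i == pairAt l k) with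
    | none =>
      have hnone := List.find?_eq_none.mp hfind
      have hstep : bstep l r (k : Int) = (r.1.insert (pairAt l k) (k : Int), r.2) := by
        simp only [bstep]
        rw [hp, ihd, hfind]
        rfl
      rw [hstep]
      refine ⟨?_, ?_⟩
      · intro q
        show (r.1.insert (pairAt l k) (k : Int)).get? q = _
        rw [PySem.Dict.get?_insert, List.range_succ, List.find?_append]
        by_cases hq : q = pairAt l k
        · subst hq
          rw [if_pos rfl, hfind, Option.none_or]
          simp
        · have hne : (pairAt l k == q) = false := beq_eq_false_iff_ne.mpr fun h => hq h.symm
          rw [if_neg hq, ihd q]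
          simp [hne]
      · show r.2 = true ↔ _
        rw [ihb]
        constructor
        · rintro ⟨i, j, hij, hj, he⟩; exact ⟨i, j, hij, by omega, he⟩
        · rintro ⟨i, j, hij, hj, he⟩
          rcases (by omega : j < k ∨ j = k) with h | rfl
          · exact ⟨i, j, hij, h, he⟩
          · exfalso
            have hi := hnone i (List.mem_range.mpr (by omega))
            simp only [beq_iff_eq] at hi
            exact hi he.symm
    | some f =>
      obtain ⟨hfk, hPf, hmin⟩ := find?_range_minimal hfind
      have hfe : pairAt l f = pairAt l k := by simpa using hPf
      have hstep : bstep l r (k : Int)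
          = (r.1, if 2 ≤ (k : Int) - (f : Int) then true else r.2) := by
        simp only [bstep]
        rw [hp, ihd, hfind]
        rfl
      rw [hstep]
      refine ⟨?_, ?_⟩
      · intro q
        show r.1.get? q = _
        rw [ihd q, List.range_succ, List.find?_append]
        by_cases hq : q = pairAt l k
        · subst hq
          rw [hfind, Option.some_or]
        · have hne : (pairAt l k == q) = false := beq_eq_false_iff_ne.mpr fun h => hq h.symm
          simp [hne]
      · show (if 2 ≤ (k : Int) - (f : Int) then true else r.2) = true ↔ _
        by_cases hge : f + 2 ≤ k
        · rw [if_pos (by omega)]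
          simp only [true_iff]
          exact ⟨f, k, hge, by omega, hfe.symm⟩
        · rw [if_neg (by omega)]
          rw [ihb]
          constructor
          · rintro ⟨i, j, hij, hj, he⟩; exact ⟨i, j, hij, by omega, he⟩
          · rintro ⟨i, j, hij, hj, he⟩
            rcases (by omega : j < k ∨ j = k) with h | rfl
            · exact ⟨i, j, hij, h, he⟩
            · exfalso
              by_cases hif : i < f
              · have hi := hmin i hif
                rw [beq_eq_false_iff_ne] at hi
                exact hi he.symm
              · omega

lemma bpair_iff (l : List Char) :
    (((PySem.List.pyRange 0 ((l.length : Int) - 1) 1).foldl (bstep l)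
        (PySem.Dict.empty, false)).2 = true) ↔ PairP l := by
  rcases Nat.eq_zero_or_pos l.length with h0 | hpos
  · rw [h0]
    rw [show ((0 : Nat) : Int) - 1 = -1 by norm_num,
        PySem.List.pyRange_one_eq_nil (by omega)]
    simp only [List.foldl_nil]
    constructor
    · intro h; simp at h
    · rintro ⟨i, j, _, hj, _⟩; omega
  · have e : ((l.length : Int) - 1) = ((l.length - 1 : Nat) : Int) := by omega
    rw [e, (b_loop_inv l (l.length - 1)).2]
    constructor
    · rintro ⟨i, j, hij, hj, he⟩; exact ⟨i, j, hij, by omega, he⟩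
    · rintro ⟨i, j, hij, hj, he⟩; exact ⟨i, j, hij, by omega, he⟩

-- ===== VERDICT (by name: the statement is the Claim_ definition above) =====
theorem is_nice_improved_spec : Claim_equal_is_nice_improved := by
  intro s _
  show is_nice_improved s = is_nice_improved_alt s
  simp only [is_nice_improved, is_nice_improved_alt]
  exact and_congr_bool
    (((a_loop s.toList s.toList.length).1).trans (agap_iff s.toList) |>.trans (bgap_iff s.toList).symm)
    (((a_loop s.toList s.toList.length).2).trans (apair_iff s.toList) |>.trans (bpair_iff s.toList).symm)
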